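-- pv_equiv track=rewrite | github.com/101015010/filrouge_ias | CodeAnalayseAlgoRecuitSimulé.py | choixRessource
-- ===== SOURCE A (Python) =====
-- def choixRessource(phase):
--     #Soit phase une liste de ressources, cette fonction détermine quelle ressource prend la tâche
--
--     mini = phase[0][-1][1]+phase[0][-1][2]
--     index = 0
--
--     found = False
--     iRessource = 0
--
--     while (not found) and iRessource < len(phase):
--         ressource = phase[iRessource]
--         if ressource == [(0,0,0)]:
--             found = True
--             index = iRessource
--         elif ressource[-1][1]+ressource[-1][2] < mini:
--             mini = ressource[-1][1]+ressource[-1][2]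
--             index = iRessource
--         iRessource+=1
--
--     return index
-- ===== SOURCE B (Python) =====
-- def choixRessource(phase):
--     # First pass: the index of the first empty-sentinel resource, if any.
--     for i, r in enumerate(phase):
--         if r == [(0, 0, 0)]:
--             return i
--     # Second pass: earliest index with minimal end-time sum.
--     best = phase[0][-1][1] + phase[0][-1][2]
--     best_i = 0
--     for i in range(1, len(phase)):
--         s = phase[i][-1][1] + phase[i][-1][2]
--         if s < best:
--             best = s
--             best_i = i
--     return best_i
-- ===== Notes on version B (the rewrite author's own statement) =====
-- stated objective: simpler
-- what changed: Replaces A's single while-loop with a found-flag and mixed state by two separate passes: an early-return scan for the first sentinel resource, then a plain seeded argmin over end-time sums.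
import Mathlib
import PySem

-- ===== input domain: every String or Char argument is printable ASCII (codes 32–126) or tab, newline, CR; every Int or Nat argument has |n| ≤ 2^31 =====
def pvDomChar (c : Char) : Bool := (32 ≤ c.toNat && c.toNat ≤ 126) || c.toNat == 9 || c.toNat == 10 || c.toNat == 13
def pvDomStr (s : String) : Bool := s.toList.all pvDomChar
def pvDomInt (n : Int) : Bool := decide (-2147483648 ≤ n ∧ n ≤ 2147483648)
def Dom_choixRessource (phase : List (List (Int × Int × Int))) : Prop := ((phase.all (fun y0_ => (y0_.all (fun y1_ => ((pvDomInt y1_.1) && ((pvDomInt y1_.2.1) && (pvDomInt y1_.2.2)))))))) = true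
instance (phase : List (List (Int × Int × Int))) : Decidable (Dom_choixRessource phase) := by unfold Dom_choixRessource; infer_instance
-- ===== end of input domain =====

-- B replaces A's single while-loop (found flag + mixed min/sentinel state) by two
-- separate passes: an early-return scan for the first sentinel, then a seeded argmin.

-- ===== PORT A =====
-- ressource[-1][1]+ressource[-1][2]; last element via pyGet? (-1); 0 at none (Pre_ excludes that raise)
def pvLastSum (r : List (Int × Int × Int)) : Int :=
  match PySem.List.pyGet? r (-1) with
  | some t => t.2.1 + t.2.2
  | none => 0

def pvALoop : List (List (Int × Int × Int)) → Int → Int → Int → Int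
  | [], _, _, index => index
  | r :: rest, i, mini, index =>
    if r = [((0 : Int), (0 : Int), (0 : Int))] then i
    else if pvLastSum r < mini then pvALoop rest (i + 1) (pvLastSum r) i
    else pvALoop rest (i + 1) mini index

def choixRessource (phase : List (List (Int × Int × Int))) : Int :=
  pvALoop phase 0 (pvLastSum (phase.headD [])) 0

-- ===== PORT B =====
-- first pass: index of the first sentinel resource
def pvBFind : List (List (Int × Int × Int)) → Int → Option Int
  | [], _ => none
  | r :: rest, i =>
    if r = [((0 : Int), (0 : Int), (0 : Int))] then some i else pvBFind rest (i + 1)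

-- second pass: earliest index of minimal end-time sum
def pvBArgmin : List (List (Int × Int × Int)) → Int → Int → Int → Int
  | [], _, _, bi => bi
  | r :: rest, i, best, bi =>
    if pvLastSum r < best then pvBArgmin rest (i + 1) (pvLastSum r) i
    else pvBArgmin rest (i + 1) best bi

def choixRessource_alt (phase : List (List (Int × Int × Int))) : Int :=
  match pvBFind phase 0 with
  | some i => i
  | none =>
    match phase with
    | [] => 0
    | r0 :: rest => pvBArgmin rest 1 (pvLastSum r0) 0

-- ===== PRECONDITION & SPEC =====
-- Pre_ excludes exactly the inputs where A raises IndexError: the empty phase, and an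
-- empty resource list reached before any sentinel (phase[0][-1] or ressource[-1] fails).
def Pre_choixRessource (phase : List (List (Int × Int × Int))) : Prop :=
  phase ≠ [] ∧ ∀ i ∈ List.range phase.length,
    phase.getD i [] = [] → [((0 : Int), (0 : Int), (0 : Int))] ∈ phase.take i
instance (phase : List (List (Int × Int × Int))) : Decidable (Pre_choixRessource phase) := by
  unfold Pre_choixRessource; infer_instance
def pvWitness_choixRessource : (List (List (Int × Int × Int))) := [[(1, 2, 3)], [(0, 0, 0)]]
def Spec_choixRessource (phase : List (List (Int × Int × Int))) (out : Int) : Prop := out = choixRessource_alt phase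
instance (phase : List (List (Int × Int × Int))) (out : Int) : Decidable (Spec_choixRessource phase out) := by unfold Spec_choixRessource; infer_instance

-- ===== CLAIM (what is proved, stated in full; the proofs are below) =====
def Claim_equal_choixRessource : Prop := ∀ (phase : List (List (Int × Int × Int))), Dom_choixRessource phase → Pre_choixRessource phase → Spec_choixRessource phase (choixRessource phase)

-- ===== LEMMAS AND PROOFS =====
-- A's loop equals: first sentinel from position i if any, else the argmin continuation.
theorem pvALoop_eq (rest : List (List (Int × Int × Int))) :
    ∀ (i mini index : Int),
      pvALoop rest i mini index =
        (match pvBFind rest i with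
         | some j => j
         | none => pvBArgmin rest i mini index) := by
  induction rest with
  | nil => intro i mini index; rfl
  | cons r t ih =>
    intro i mini index
    by_cases hs : r = [((0 : Int), (0 : Int), (0 : Int))]
    · simp [pvALoop, pvBFind, hs]
    · by_cases hlt : pvLastSum r < mini
      · simp [pvALoop, pvBFind, pvBArgmin, hs, hlt, ih]
      · simp [pvALoop, pvBFind, pvBArgmin, hs, hlt, ih]

-- ===== VERDICT (by name: the statement is the Claim_ definition above) =====
theorem choixRessource_spec : Claim_equal_choixRessource := by
  intro phase _ _
  unfold Spec_choixRessource choixRessource choixRessource_alt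
  cases phase with
  | nil => rfl
  | cons r0 rest =>
    by_cases hs : r0 = [((0 : Int), (0 : Int), (0 : Int))]
    · simp [pvALoop, pvBFind, hs]
    · have h := pvALoop_eq rest 1 (pvLastSum r0) 0
      simpa [pvALoop, pvBFind, hs, lt_irrefl] using h
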